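-- pv_equiv track=rewrite | github.com/AdamZhouSE/pythonHomework | Code/CodeRecords/2506/60829/268104.py | find
-- ===== SOURCE A (Python) =====
-- def find(a):
--     count=0
--     sum=0
--     for i in range(0,len(a)-1):
--         for j in range(i+1,len(a)):
--             count=judge(a[i:j+1])
--             if count > sum:
--                 sum = count
--     return sum
--
-- def judge(x):
--     count=1
--     cc=x[0]
--     for i in range(1,len(x)):
--         if x[i]>cc:
--             count=count+1
--             cc=x[i]
--     return count
-- ===== SOURCE B (Python) =====
-- def find(a):
--     # For a fixed start i, the greedy prefix-maxima count of a[i:j+1] is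
--     # nondecreasing in j, so the inner maximisation over j collapses to one
--     # scan of the full suffix a[i:].  One scan per start instead of a scan
--     # per (start, end) pair.
--     best = 0
--     for i in range(len(a) - 1):
--         cnt = 1
--         cur = a[i]
--         for x in a[i + 1:]:
--             if x > cur:
--                 cnt += 1
--                 cur = x
--         best = max(best, cnt)
--     return best
-- ===== Notes on version B (the rewrite author's own statement) =====
-- stated objective: faster
-- what changed: The inner loop over subarray end points is removed: the greedy prefix-maxima count is nondecreasing as the subarray is extended to the right, so for each start index one single scan of the full suffix suffices (and the judge helper is inlined into that scan).
import Mathlib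
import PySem

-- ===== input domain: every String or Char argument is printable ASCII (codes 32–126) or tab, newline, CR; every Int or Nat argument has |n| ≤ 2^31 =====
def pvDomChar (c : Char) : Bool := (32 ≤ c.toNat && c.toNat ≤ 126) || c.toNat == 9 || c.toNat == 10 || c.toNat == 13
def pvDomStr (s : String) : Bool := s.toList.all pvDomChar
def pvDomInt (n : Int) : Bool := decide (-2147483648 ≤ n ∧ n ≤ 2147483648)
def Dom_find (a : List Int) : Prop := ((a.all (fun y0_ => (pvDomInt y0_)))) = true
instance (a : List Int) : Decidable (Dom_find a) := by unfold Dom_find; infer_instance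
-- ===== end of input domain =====

-- B removes A's inner loop over subarray end points (the greedy count is
-- nondecreasing under rightward extension), turning O(n^3) into O(n^2).

-- ===== PORT A =====
def judge (x : List Int) : Int :=
  ((PySem.List.pyRange 1 (x.length : Int) 1).foldl
    (fun (s : Int × Int) i =>
      let xi := PySem.List.pyGetD x i 0
      if xi > s.2 then (s.1 + 1, xi) else s)
    (1, PySem.List.pyGetD x 0 0)).1

def find (a : List Int) : Int :=
  (PySem.List.pyRange 0 ((a.length : Int) - 1) 1).foldl
    (fun sum i =>
      (PySem.List.pyRange (i + 1) (a.length : Int) 1).foldl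
        (fun sum j =>
          let count := judge (PySem.List.slice a (some i) (some (j + 1)))
          if count > sum then count else sum)
        sum)
    0

-- ===== PORT B =====
def find_alt (a : List Int) : Int :=
  (PySem.List.pyRange 0 ((a.length : Int) - 1) 1).foldl
    (fun best i =>
      let st := (PySem.List.slice a (some (i + 1)) none).foldl
        (fun (p : Int × Int) x => if x > p.2 then (p.1 + 1, x) else p)
        (1, PySem.List.pyGetD a i 0)
      max best st.1)
    0

-- ===== PRECONDITION & SPEC =====
def Spec_find (a : List Int) (out : Int) : Prop := out = find_alt a
instance (a : List Int) (out : Int) : Decidable (Spec_find a out) := by unfold Spec_find; infer_instance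

-- ===== CLAIM (what is proved, stated in full; the proofs are below) =====
def Claim_equal_find : Prop := ∀ (a : List Int), Dom_find a → Spec_find a (find a)

-- ===== LEMMAS AND PROOFS =====

theorem judge_cons (c : Int) (l : List Int) :
    judge (c :: l)
      = (l.foldl (fun (p : Int × Int) x => if x > p.2 then (p.1 + 1, x) else p) (1, c)).1 := by
  unfold judge
  rw [PySem.List.foldl_pyRange_pyGetD' (c :: l) 0
      (fun (p : Int × Int) v => if v > p.2 then (p.1 + 1, v) else p)
      (1, PySem.List.pyGetD (c :: l) 0 0) (a := 1) (by omega)]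
  simp [PySem.List.pyGetD_zero_cons]
theorem judge_le_append (c : Int) (u : List Int) (y : Int) :
    judge (c :: u) ≤ judge (c :: (u ++ [y])) := by
  rw [judge_cons, judge_cons, List.foldl_append]
  simp only [List.foldl]
  split <;> simp

theorem judge_take_mono (t : List Int) (m : Nat) (h1 : 1 ≤ m) (h2 : m < t.length) :
    judge (t.take m) ≤ judge (t.take (m + 1)) := by
  cases t with
  | nil => simp at h2
  | cons c rest =>
    obtain ⟨m', rfl⟩ : ∃ m', m = m' + 1 := ⟨m - 1, by omega⟩
    have hlt : m' < rest.length := by simp at h2; omega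
    simp only [List.take_succ_cons]
    rw [List.take_add_one, List.getElem?_eq_getElem hlt]
    simp only [Option.toList_some]
    exact judge_le_append c (rest.take m') _

theorem slice_mono (a : List Int) (i j : Int) (h0 : 0 ≤ i) (hij : i < j)
    (hj : j + 1 < (a.length : Int)) :
    judge (PySem.List.slice a (some i) (some (j + 1)))
      ≤ judge (PySem.List.slice a (some i) (some (j + 1 + 1))) := by
  rw [PySem.List.slice_toNat a h0 (by omega), PySem.List.slice_toNat a h0 (by omega)]
  have hm1 : (j + 1 + 1).toNat - i.toNat = ((j + 1).toNat - i.toNat) + 1 := by omega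
  rw [hm1]
  exact judge_take_mono (a.drop i.toNat) ((j + 1).toNat - i.toNat) (by omega)
    (by rw [List.length_drop]; omega)

theorem maxfold (g : Int → Int) (lo s : Int) :
    ∀ (k : Nat), (∀ j, lo ≤ j → j < lo + k → g j ≤ g (j + 1)) →
      (PySem.List.pyRange lo (lo + 1 + k) 1).foldl
        (fun s j => if g j > s then g j else s) s = max s (g (lo + k)) := by
  intro k
  induction k with
  | zero =>
    intro _
    rw [show lo + 1 + ((0 : Nat) : Int) = lo + 1 by push_cast; omega, PySem.List.pyRange_one_singleton]
    simp only [List.foldl, Nat.cast_zero, add_zero]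
    split <;> omega
  | succ k ih =>
    intro hmono
    rw [show lo + 1 + ((k + 1 : Nat) : Int) = (lo + 1 + k) + 1 by push_cast; omega,
        PySem.List.pyRange_one_succ_right (by omega), List.foldl_append,
        ih (fun j hj hj' => hmono j hj (by push_cast at hj' ⊢; omega))]
    simp only [List.foldl]
    have h := hmono (lo + k) (by omega) (by push_cast; omega)
    rw [show lo + (k : Int) + 1 = lo + 1 + k by omega] at h
    rw [show lo + ((k + 1 : Nat) : Int) = lo + 1 + k by push_cast; omega]
    split <;> omega

theorem inner_eq (a : List Int) (i : Int) (h0 : 0 ≤ i) (h1 : i < (a.length : Int) - 1)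
    (s : Int) :
    (PySem.List.pyRange (i + 1) ((a.length : Int)) 1).foldl
      (fun sum j =>
        let count := judge (PySem.List.slice a (some i) (some (j + 1)))
        if count > sum then count else sum) s
      = max s (judge (a.drop i.toNat)) := by
  have hk : ((a.length : Int) - i - 2).toNat = ((a.length : Int) - i - 2) := by omega
  have hsplit : (a.length : Int) = (i + 1) + 1 + (((a.length : Int) - i - 2).toNat : Int) := by omega
  rw [hsplit]
  rw [maxfold (fun j => judge (PySem.List.slice a (some i) (some (j + 1)))) (i + 1) s
      ((a.length : Int) - i - 2).toNat
      (fun j hj hj' => slice_mono a i j h0 (by omega) (by omega))]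
  have he : (i + 1) + (((a.length : Int) - i - 2).toNat : Int) + 1 = (a.length : Int) := by omega
  rw [he]
  rw [PySem.List.slice_toNat a h0 (by omega)]
  rw [List.take_of_length_le (by simp only [List.length_drop]; omega)]

-- ===== VERDICT (by name: the statement is the Claim_ definition above) =====
theorem find_spec : Claim_equal_find := by
  intro a _
  unfold Spec_find find find_alt
  apply PySem.List.foldl_congr_mem
  intro acc i hi
  rw [PySem.List.mem_pyRange_one] at hi
  obtain ⟨h0, h1⟩ := hi
  show (PySem.List.pyRange (i + 1) ((a.length : Int)) 1).foldl
      (fun sum j =>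
        let count := judge (PySem.List.slice a (some i) (some (j + 1)))
        if count > sum then count else sum) acc = _
  rw [inner_eq a i h0 h1 acc]
  have hilt : i.toNat < a.length := by omega
  show _ = max acc ((PySem.List.slice a (some (i + 1)) none).foldl
        (fun (p : Int × Int) x => if x > p.2 then (p.1 + 1, x) else p)
        (1, PySem.List.pyGetD a i 0)).1
  rw [PySem.List.slice_from a (by omega : (0:Int) ≤ i + 1),
      PySem.List.pyGetD_eq_getElem a 0 h0 (by omega),
      show (i + 1).toNat = i.toNat + 1 by omega,
      List.drop_eq_getElem_cons hilt, judge_cons]
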